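-- pv_equiv track=rewrite | github.com/sabyasachi-choudhury/DeepLearningExperiments | sentiment.py | plateaus
-- ===== SOURCE A (Python) =====
-- def plateaus(m):
--     count = 0
--     ind = 0
--     ret = []
--     for i, elem in enumerate(m):
--         if elem > 0:
--             count += 1
--             if count == 1:
--                 ind = i
--         else:
--             if count >= 5:
--                 ret.append([ind, ind+count])
--             ind = 0
--             count = 0
--     return ret
-- ===== SOURCE B (Python) =====
-- def plateaus(m):
--     # two-pointer run scan; like the original, a run that reaches the end of
--     # the list is never recorded (only runs closed by a non-positive element)
--     res = []
--     n = len(m)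
--     i = 0
--     while i < n:
--         if m[i] <= 0:
--             i += 1
--             continue
--         j = i + 1
--         while j < n and m[j] > 0:
--             j += 1
--         if j < n and j - i >= 5:
--             res.append([i, j])
--         i = j
--     return res
-- ===== Notes on version B (the rewrite author's own statement) =====
-- stated objective: alternative
-- what changed: replaces A's flat stateful counter (count/ind reset on every element) with an explicit two-pointer run scan that locates each positive run's boundaries with an inner scan and emits the interval at once
import Mathlib
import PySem

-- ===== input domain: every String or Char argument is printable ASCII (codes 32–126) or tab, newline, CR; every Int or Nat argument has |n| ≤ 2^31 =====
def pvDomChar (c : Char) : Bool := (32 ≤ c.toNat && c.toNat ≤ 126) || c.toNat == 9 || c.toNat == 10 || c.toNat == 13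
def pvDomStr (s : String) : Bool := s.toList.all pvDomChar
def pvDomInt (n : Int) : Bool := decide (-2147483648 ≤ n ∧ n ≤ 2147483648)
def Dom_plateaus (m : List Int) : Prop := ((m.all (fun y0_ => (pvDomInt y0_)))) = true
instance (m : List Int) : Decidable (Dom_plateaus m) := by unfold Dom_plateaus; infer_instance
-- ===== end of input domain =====

-- B replaces A's flat per-element counter with a two-pointer run scan over run boundaries;
-- like A, it only records a run that is closed by a non-positive element.

-- ===== PORT A =====
-- the for-loop over enumerate(m), carrying the index i and the state (count, ind, ret)
def plateausLoopA (i count ind : Int) (ret : List (List Int)) : List Int → List (List Int)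
  | [] => ret
  | x :: xs =>
    if x > 0 then
      plateausLoopA (i + 1) (count + 1) (if count + 1 = 1 then i else ind) ret xs
    else
      plateausLoopA (i + 1) 0 0 (if count ≥ 5 then ret ++ [[ind, ind + count]] else ret) xs

def plateaus (m : List Int) : List (List Int) := plateausLoopA 0 0 0 [] m

-- ===== PORT B =====
-- the inner while loop: advance j while the element is > 0; returns (final j, rest of the list)
def plateausRun (j : Int) : List Int → Int × List Int
  | [] => (j, [])
  | x :: xs => if x > 0 then plateausRun (j + 1) xs else (j, x :: xs)

-- the outer while loop over i; the fuel (initially the list length) only encodes termination,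
-- each iteration consumes at least one element so it never runs out.
-- 'r.2 ≠ []' is Python's 'j < n': the run was closed by a non-positive element
def plateausScan : Nat → Int → List Int → List (List Int)
  | 0, _, _ => []
  | _ + 1, _, [] => []
  | fuel + 1, i, x :: xs =>
    if x ≤ 0 then plateausScan fuel (i + 1) xs
    else
      let r := plateausRun (i + 1) xs
      (if r.2 ≠ [] ∧ r.1 - i ≥ 5 then [[i, r.1]] else []) ++ plateausScan fuel r.1 r.2

def plateaus_alt (m : List Int) : List (List Int) := plateausScan m.length 0 m

-- ===== PRECONDITION & SPEC =====
def Spec_plateaus (m : List Int) (out : List (List Int)) : Prop := out = plateaus_alt m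
instance (m : List Int) (out : List (List Int)) : Decidable (Spec_plateaus m out) := by
  unfold Spec_plateaus; infer_instance

-- ===== CLAIM (what is proved, stated in full; the proofs are below) =====
def Claim_equal_plateaus : Prop := ∀ (m : List Int), Dom_plateaus m → Spec_plateaus m (plateaus m)

-- ===== LEMMAS AND PROOFS =====

theorem run_spec (l : List Int) : ∀ j : Int,
    plateausRun j l =
      (j + ((l.takeWhile (fun x => decide (0 < x))).length : Int),
       l.dropWhile (fun x => decide (0 < x))) := by
  induction l with
  | nil => intro j; simp [plateausRun]
  | cons x xs ih =>
    intro j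
    by_cases h : (0 : Int) < x
    · simp only [plateausRun, if_pos h, ih (j + 1), List.takeWhile_cons, List.dropWhile_cons,
        decide_eq_true h, if_true, Prod.mk.injEq, List.length_cons]
      refine ⟨by push_cast; ring, trivial⟩
    · simp [plateausRun, h]

theorem head_dropWhile_false {p : Int → Bool} (l : List Int) {y : Int} {ys : List Int}
    (h : l.dropWhile p = y :: ys) : p y = false := by
  induction l with
  | nil => simp at h
  | cons x xs ih =>
    rw [List.dropWhile_cons] at h
    by_cases hx : p x = true
    · exact ih (by simpa [hx] using h)
    · rw [if_neg hx] at h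
      cases h
      simpa using hx

-- A's loop inside a positive run (count c ≥ 1 started at ind) when the run reaches the end
theorem midA_all (l : List Int) : ∀ (c ind : Int) (ret : List (List Int)), 1 ≤ c →
    l.dropWhile (fun x => decide (0 < x)) = [] →
    plateausLoopA (ind + c) c ind ret l = ret := by
  induction l with
  | nil => intro c ind ret _ _; rfl
  | cons x xs ih =>
    intro c ind ret hc hd
    rw [List.dropWhile_cons] at hd
    by_cases h : (0 : Int) < x
    · rw [if_pos (by simpa using h)] at hd
      have hne : ¬ (c + 1 = 1) := by omega
      simp only [plateausLoopA, if_pos h, if_neg hne]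
      rw [show ind + c + 1 = ind + (c + 1) by ring]
      exact ih (c + 1) ind ret (by omega) hd
    · rw [if_neg (by simpa using h)] at hd
      simp at hd

-- A's loop inside a positive run that is closed by a non-positive element y
theorem midA_stop (l : List Int) : ∀ (c ind : Int) (ret : List (List Int)) (y : Int) (ys : List Int),
    1 ≤ c →
    l.dropWhile (fun x => decide (0 < x)) = y :: ys →
    plateausLoopA (ind + c) c ind ret l =
      plateausLoopA (ind + c + ((l.takeWhile (fun x => decide (0 < x))).length : Int) + 1) 0 0
        (if 5 ≤ c + ((l.takeWhile (fun x => decide (0 < x))).length : Int) then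
            ret ++ [[ind, ind + c + ((l.takeWhile (fun x => decide (0 < x))).length : Int)]]
         else ret) ys := by
  induction l with
  | nil => intro c ind ret y ys _ hd; simp at hd
  | cons x xs ih =>
    intro c ind ret y ys hc hd
    rw [List.dropWhile_cons] at hd
    by_cases h : (0 : Int) < x
    · rw [if_pos (by simpa using h)] at hd
      have hne : ¬ (c + 1 = 1) := by omega
      simp only [plateausLoopA, if_pos h, if_neg hne, List.takeWhile_cons, decide_eq_true h,
        if_true, List.length_cons]
      rw [show ind + c + 1 = ind + (c + 1) by ring, ih (c + 1) ind ret y ys (by omega) hd]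
      rw [show ind + (c + 1) + ((xs.takeWhile (fun x => decide (0 < x))).length : Int) + 1
          = ind + c + ((((xs.takeWhile (fun x => decide (0 < x))).length + 1 : Nat)) : Int) + 1 from by
        push_cast; ring]
      rw [show ((c + 1) + ((xs.takeWhile (fun x => decide (0 < x))).length : Int))
          = (c + ((((xs.takeWhile (fun x => decide (0 < x))).length + 1 : Nat)) : Int)) from by
        push_cast; ring]
      rw [show ind + (c + 1) + ((xs.takeWhile (fun x => decide (0 < x))).length : Int)
          = ind + c + ((((xs.takeWhile (fun x => decide (0 < x))).length + 1 : Nat)) : Int) from by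
        push_cast; ring]
    · rw [if_neg (by simpa using h)] at hd
      cases hd
      simp only [plateausLoopA, if_neg h, List.takeWhile_cons, decide_eq_false h,
        Bool.false_eq_true, if_false, List.length_nil]
      norm_num

-- A's loop from a reset state equals B's scan (fuel covering the list length)
theorem zeroA : ∀ (fuel : Nat) (l : List Int), l.length ≤ fuel → ∀ (i : Int) (ret : List (List Int)),
    plateausLoopA i 0 0 ret l = ret ++ plateausScan fuel i l := by
  intro fuel
  induction fuel using Nat.strong_induction_on with
  | _ fuel ih =>
  intro l hl i ret
  match fuel, l with
  | f, [] => cases f <;> simp [plateausLoopA, plateausScan]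
  | 0, x :: xs => simp at hl
  | n + 1, x :: xs =>
    have hxs : xs.length ≤ n := by simpa using hl
    by_cases h : (0 : Int) < x
    · -- positive head: A enters a run with count 1, ind = i
      have hstep : plateausLoopA i 0 0 ret (x :: xs) = plateausLoopA (i + 1) 1 i ret xs := by
        simp [plateausLoopA, h]
      have hscan : plateausScan (n + 1) i (x :: xs)
          = (if (plateausRun (i + 1) xs).2 ≠ [] ∧ (plateausRun (i + 1) xs).1 - i ≥ 5 then
               [[i, (plateausRun (i + 1) xs).1]] else [])
            ++ plateausScan n (plateausRun (i + 1) xs).1 (plateausRun (i + 1) xs).2 := by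
        simp [plateausScan, show ¬ x ≤ 0 by omega]
      rw [hstep, hscan, run_spec]
      rcases hrest : xs.dropWhile (fun x => decide (0 < x)) with _ | ⟨y, ys⟩
      · -- run reaches the end of the list: neither side records anything
        rw [show plateausLoopA (i + 1) 1 i ret xs = ret from by
          have := midA_all xs 1 i ret (le_refl 1) hrest
          rwa [show i + (1 : Int) = i + 1 from rfl] at this]
        cases n <;> simp [plateausScan]
      · -- run closed by a non-positive element y
        have hy : ¬ (0 : Int) < y := by simpa using head_dropWhile_false xs hrest
        have hxeq : xs = xs.takeWhile (fun x => decide (0 < x)) ++ y :: ys := by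
          rw [← hrest]; exact (List.takeWhile_append_dropWhile).symm
        have hlen : xs.length = (xs.takeWhile (fun x => decide (0 < x))).length + 1 + ys.length := by
          have := congrArg List.length hxeq
          simp at this
          omega
        obtain ⟨k, rfl⟩ : ∃ k, n = k + 1 := ⟨n - 1, by omega⟩
        -- A side: close the run via midA_stop, then recurse with the reset state
        have hA := midA_stop xs 1 i ret y ys (le_refl 1) hrest
        rw [show i + (1 : Int) = i + 1 from rfl] at hA
        rw [hA, ih k (by omega) ys (by omega)
          (i + 1 + ((xs.takeWhile (fun x => decide (0 < x))).length : Int) + 1)]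
        -- B side: step the scan over y
        rw [show plateausScan (k + 1)
              (i + 1 + ((xs.takeWhile (fun x => decide (0 < x))).length : Int), (y : Int) :: ys).1
              (i + 1 + ((xs.takeWhile (fun x => decide (0 < x))).length : Int), (y : Int) :: ys).2
            = plateausScan k
              (i + 1 + ((xs.takeWhile (fun x => decide (0 < x))).length : Int) + 1) ys from by
          simp [plateausScan, show y ≤ 0 by omega]]
        set S := plateausScan k
          (i + 1 + ((xs.takeWhile (fun x => decide (0 < x))).length : Int) + 1) ys with hS
        set T := ((xs.takeWhile (fun x => decide (0 < x))).length : Int) with hT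
        have hcond : ((i + 1 + T, (y : Int) :: ys).2 ≠ [] ∧ (i + 1 + T, (y : Int) :: ys).1 - i ≥ 5)
            ↔ (5 ≤ 1 + T) := by
          simp only [ne_eq, List.cons_ne_nil, not_false_eq_true, true_and]
          omega
        by_cases h5 : 5 ≤ 1 + T
        · rw [if_pos (by omega : 5 ≤ 1 + T), if_pos (hcond.mpr h5)]
          simp
        · rw [if_neg (by omega : ¬ 5 ≤ 1 + T), if_neg (fun hcc => h5 (hcond.mp hcc))]
          simp
    · -- non-positive head: both sides skip it (A's count is 0, so it appends nothing)
      have hstep : plateausLoopA i 0 0 ret (x :: xs) = plateausLoopA (i + 1) 0 0 ret xs := by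
        simp [plateausLoopA, h]
      have hscan : plateausScan (n + 1) i (x :: xs) = plateausScan n (i + 1) xs := by
        simp [plateausScan, show x ≤ 0 by omega]
      rw [hstep, hscan, ih n (by omega) xs hxs (i + 1) ret]

-- ===== VERDICT (by name: the statement is the Claim_ definition above) =====
theorem plateaus_spec : Claim_equal_plateaus := by
  intro m _hdom
  show plateaus m = plateaus_alt m
  unfold plateaus plateaus_alt
  rw [zeroA m.length m (le_refl _) 0 []]
  simp
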